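-- pv_equiv track=rewrite | github.com/Degover/advent-of-code-2021 | challenges/day_03.py | generate_bit_arrays
-- ===== SOURCE A (Python) =====
-- def generate_bit_arrays(raw_input):
--     bit_array = []
--     for char in raw_input:
--         if char == '\n':
--             yield bit_array
--             bit_array = []
--             continue
--
--         bit = 0 if char == '0' else 1
--         bit_array.append(bit)
--     yield bit_array
-- ===== SOURCE B (Python) =====
-- def generate_bit_arrays(raw_input):
--     for line in raw_input.split('\n'):
--         yield [0 if c == '0' else 1 for c in line]
-- ===== Notes on version B (the rewrite author's own statement) =====
-- stated objective: idiomatic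
-- what changed: Replaces A's flat character loop with flush-on-newline accumulator state by splitting the input on the newline character first and mapping each line to its bit list with a comprehension.
import Mathlib
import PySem

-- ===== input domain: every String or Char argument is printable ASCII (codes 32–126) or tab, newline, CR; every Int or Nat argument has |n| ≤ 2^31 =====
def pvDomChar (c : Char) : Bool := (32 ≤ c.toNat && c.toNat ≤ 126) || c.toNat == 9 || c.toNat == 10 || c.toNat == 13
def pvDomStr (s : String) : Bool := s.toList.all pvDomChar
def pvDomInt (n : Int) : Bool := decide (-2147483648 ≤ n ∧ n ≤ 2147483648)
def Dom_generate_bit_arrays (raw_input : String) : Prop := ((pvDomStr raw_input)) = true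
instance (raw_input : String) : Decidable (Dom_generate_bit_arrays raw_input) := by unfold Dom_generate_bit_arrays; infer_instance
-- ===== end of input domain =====

-- B replaces A's flat character loop with flush-on-newline accumulator state by an
-- idiomatic split-on-newline followed by a per-line map (return value of the generator as a list).

-- ===== PORT A =====
-- the generator's character loop: state = current bit_array; final 'yield bit_array' at end of input
def gbaLoop : List Char → List Int → List (List Int)
  | [], bit_array => [bit_array]
  | c :: rest, bit_array =>
      if c = '\n' then bit_array :: gbaLoop rest []
      else gbaLoop rest (bit_array ++ [if c = '0' then (0 : Int) else 1])

def generate_bit_arrays (raw_input : String) : List (List Int) :=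
  gbaLoop raw_input.toList []

-- ===== PORT B =====
def generate_bit_arrays_alt (raw_input : String) : List (List Int) :=
  match PySem.Str.split? raw_input "\n" with
  | some lines => lines.map (fun line => line.toList.map (fun c => if c = '0' then (0 : Int) else 1))
  | none => []   -- unreachable: the separator "\n" is nonempty

-- ===== PRECONDITION & SPEC =====
def Spec_generate_bit_arrays (raw_input : String) (out : List (List Int)) : Prop := out = generate_bit_arrays_alt raw_input
instance (raw_input : String) (out : List (List Int)) : Decidable (Spec_generate_bit_arrays raw_input out) := by unfold Spec_generate_bit_arrays; infer_instance

-- ===== CLAIM (what is proved, stated in full; the proofs are below) =====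
def Claim_equal_generate_bit_arrays : Prop := ∀ (raw_input : String), Dom_generate_bit_arrays raw_input → Spec_generate_bit_arrays raw_input (generate_bit_arrays raw_input)

-- ===== LEMMAS AND PROOFS =====

-- structural single-char split on '\n'
def nlSplit : List Char → List (List Char)
  | [] => [[]]
  | c :: rest =>
      if c = '\n' then [] :: nlSplit rest
      else
        match nlSplit rest with
        | [] => [[c]]
        | p :: ps => (c :: p) :: ps

def pvBit (c : Char) : Int := if c = '0' then 0 else 1

def prependC (x : List Char) : List (List Char) → List (List Char)
  | [] => [x]
  | p :: ps => (x ++ p) :: ps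

def prependI (x : List Int) : List (List Int) → List (List Int)
  | [] => [x]
  | p :: ps => (x ++ p) :: ps

lemma nlSplit_ne_nil (l : List Char) : nlSplit l ≠ [] := by
  cases l with
  | nil => simp [nlSplit]
  | cons c rest =>
    simp only [nlSplit]
    split_ifs
    · simp
    · cases h : nlSplit rest <;> simp

lemma go_eq (l : List Char) : ∀ (fuel : Nat) (cur : List Char) (acc : List (List Char)),
    l.length ≤ fuel →
    PySem.Chars.splitOn.go ['\n'] fuel l cur acc
      = acc.reverse ++ prependC cur.reverse (nlSplit l) := by
  induction l with
  | nil =>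
    intro fuel cur acc _
    cases fuel <;> simp [PySem.Chars.splitOn.go, nlSplit, prependC]
  | cons c rest ih =>
    intro fuel cur acc hf
    cases fuel with
    | zero => simp at hf
    | succ n =>
      by_cases hc : c = '\n'
      · subst hc
        have h1 : PySem.Chars.splitOn.go ['\n'] (n+1) ('\n' :: rest) cur acc
            = PySem.Chars.splitOn.go ['\n'] n rest [] (cur.reverse :: acc) := by
          simp [PySem.Chars.splitOn.go, List.isPrefixOf]
        rw [h1, ih n [] (cur.reverse :: acc) (by simpa using hf)]
        simp [nlSplit]
        cases h : nlSplit rest with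
        | nil => exact absurd h (nlSplit_ne_nil rest)
        | cons p ps => simp [prependC]
      · have h1 : PySem.Chars.splitOn.go ['\n'] (n+1) (c :: rest) cur acc
            = PySem.Chars.splitOn.go ['\n'] n rest (c :: cur) acc := by
          simp only [PySem.Chars.splitOn.go, List.isPrefixOf]
          rw [if_neg (by simp; exact fun h => hc h.symm)]
        rw [h1, ih n (c :: cur) acc (by simpa using hf)]
        simp only [nlSplit, if_neg hc, List.reverse_cons]
        cases h : nlSplit rest with
        | nil => exact absurd h (nlSplit_ne_nil rest)
        | cons p ps => simp [prependC]

lemma splitOn_eq_nlSplit (l : List Char) :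
    PySem.Chars.splitOn l ['\n'] = nlSplit l := by
  have := go_eq l (l.length + 1) [] [] (by omega)
  simp only [PySem.Chars.splitOn, this, List.reverse_nil, List.nil_append]
  cases h : nlSplit l with
  | nil => exact absurd h (nlSplit_ne_nil l)
  | cons p ps => simp [prependC]

lemma gbaLoop_eq (l : List Char) : ∀ (cur : List Int),
    gbaLoop l cur = prependI cur ((nlSplit l).map (List.map pvBit)) := by
  induction l with
  | nil => intro cur; simp [gbaLoop, nlSplit, prependI]
  | cons c rest ih =>
    intro cur
    by_cases hc : c = '\n'
    · subst hc
      simp only [gbaLoop, nlSplit, ih]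
      cases h : nlSplit rest with
      | nil => exact absurd h (nlSplit_ne_nil rest)
      | cons p ps => simp [prependI]
    · simp only [gbaLoop, if_neg hc, nlSplit, ih]
      cases h : nlSplit rest with
      | nil => exact absurd h (nlSplit_ne_nil rest)
      | cons p ps => simp [prependI, pvBit]

-- ===== VERDICT (by name: the statement is the Claim_ definition above) =====
theorem generate_bit_arrays_spec : Claim_equal_generate_bit_arrays := by
  intro raw_input _
  unfold Spec_generate_bit_arrays generate_bit_arrays generate_bit_arrays_alt
  have hch : PySem.Chars.split? raw_input.toList "\n".toList = some (nlSplit raw_input.toList) := by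
    simp [PySem.Chars.split?, splitOn_eq_nlSplit]
  have hmap := PySem.Str.split?_map raw_input "\n"
  rw [hch] at hmap
  cases hh : PySem.Str.split? raw_input "\n" with
  | none => rw [hh] at hmap; simp at hmap
  | some lines =>
    rw [hh] at hmap
    simp only [Option.map_some, Option.some.injEq] at hmap
    rw [gbaLoop_eq]
    have hrw : lines.map (fun line => line.toList.map (fun c => if c = '0' then (0 : Int) else 1))
        = (lines.map String.toList).map (List.map pvBit) := by
      simp [List.map_map, Function.comp, pvBit]
    cases h : nlSplit raw_input.toList with
    | nil => exact absurd h (nlSplit_ne_nil _)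
    | cons p ps =>
      rw [h] at hmap
      simp only [hrw, hmap, prependI, List.nil_append, List.map_cons]
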